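-- pv_equiv track=rewrite | github.com/0xDario/Pokefin | main.py | _select_api_result
-- ===== SOURCE A (Python) =====
-- def _select_api_result(data, preferred_variant=None, preferred_language=None):
--     results = data.get("result") or []
--     if not results:
--         return None
--
--     filtered = results
--     if preferred_language:
--         lang_matches = [r for r in filtered if r.get("language") == preferred_language]
--         if lang_matches:
--             filtered = lang_matches
--
--     if preferred_variant:
--         variant_matches = [r for r in filtered if r.get("variant") == preferred_variant]
--         if variant_matches:
--             filtered = variant_matches
--
--     return filtered[0] if filtered else None
-- ===== SOURCE B (Python) =====
-- def _select_api_result(data, preferred_variant=None, preferred_language=None):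
--     results = data.get("result") or []
--     if not results:
--         return None
--
--     def score(r):
--         return 2 * bool(preferred_language and r.get("language") == preferred_language) \
--              + bool(preferred_variant and r.get("variant") == preferred_variant)
--
--     return max(results, key=score)
-- ===== Notes on version B (the rewrite author's own statement) =====
-- stated objective: simpler
-- what changed: Replaced the two-stage fallback filtering (build lang_matches, conditionally narrow, build variant_matches, conditionally narrow, take head) with a single pass that scores each result 2*(language match)+1*(variant match) and returns the first maximum via max(key=score).
import Mathlib
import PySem

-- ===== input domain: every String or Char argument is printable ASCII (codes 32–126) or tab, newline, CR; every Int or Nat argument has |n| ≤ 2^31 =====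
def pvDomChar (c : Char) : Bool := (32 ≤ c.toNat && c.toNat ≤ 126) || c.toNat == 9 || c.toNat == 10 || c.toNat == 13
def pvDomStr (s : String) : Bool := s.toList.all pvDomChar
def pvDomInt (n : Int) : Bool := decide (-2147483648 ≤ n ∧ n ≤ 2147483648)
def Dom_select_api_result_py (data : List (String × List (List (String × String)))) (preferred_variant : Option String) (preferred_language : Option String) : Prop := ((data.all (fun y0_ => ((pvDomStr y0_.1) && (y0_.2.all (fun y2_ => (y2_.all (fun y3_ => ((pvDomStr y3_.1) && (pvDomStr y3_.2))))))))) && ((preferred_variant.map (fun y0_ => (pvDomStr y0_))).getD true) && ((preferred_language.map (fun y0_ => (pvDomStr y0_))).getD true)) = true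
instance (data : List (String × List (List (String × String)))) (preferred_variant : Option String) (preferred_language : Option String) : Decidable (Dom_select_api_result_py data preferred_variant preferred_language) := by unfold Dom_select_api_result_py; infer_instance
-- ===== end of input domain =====

-- B replaces A's two-stage fallback filtering with a single scored max pass (objective: simpler).

-- ===== PORT A =====
-- literal port of A's two-stage filtering
def select_api_result_py (data : List (String × List (List (String × String)))) (preferred_variant : Option String) (preferred_language : Option String) : Option (List (String × String)) :=
  -- results = data.get("result") or []
  let results : List (List (String × String)) :=
    match PySem.Dict.get? (PySem.Dict.mk data) "result" with
    | some v => if v.isEmpty then [] else v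
    | none => []
  if results.isEmpty then none
  else
    let filtered := results
    -- if preferred_language: … (truthiness: None and "" are falsy)
    let filtered :=
      match preferred_language with
      | some pl =>
          if pl ≠ "" then
            let lang_matches := filtered.filter (fun r => PySem.Dict.get? (PySem.Dict.mk r) "language" == some pl)
            if ¬ lang_matches.isEmpty then lang_matches else filtered
          else filtered
      | none => filtered
    -- if preferred_variant: …
    let filtered :=
      match preferred_variant with
      | some pv =>
          if pv ≠ "" then
            let variant_matches := filtered.filter (fun r => PySem.Dict.get? (PySem.Dict.mk r) "variant" == some pv)
            if ¬ variant_matches.isEmpty then variant_matches else filtered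
          else filtered
      | none => filtered
    -- return filtered[0] if filtered else None
    match filtered with
    | [] => none
    | r :: _ => some r

-- ===== PORT B =====
-- bool(preferred_language and r.get("language") == preferred_language)
def pvLangMatch (preferred_language : Option String) (r : List (String × String)) : Bool :=
  match preferred_language with
  | some pl => !(pl == "") && (PySem.Dict.get? (PySem.Dict.mk r) "language" == some pl)
  | none => false

-- bool(preferred_variant and r.get("variant") == preferred_variant)
def pvVarMatch (preferred_variant : Option String) (r : List (String × String)) : Bool :=
  match preferred_variant with
  | some pv => !(pv == "") && (PySem.Dict.get? (PySem.Dict.mk r) "variant" == some pv)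
  | none => false

-- score(r) = 2*lang-match + variant-match
def pvScore (preferred_variant : Option String) (preferred_language : Option String) (r : List (String × String)) : Nat :=
  (if pvLangMatch preferred_language r then 2 else 0) + (if pvVarMatch preferred_variant r then 1 else 0)

def select_api_result_py_alt (data : List (String × List (List (String × String)))) (preferred_variant : Option String) (preferred_language : Option String) : Option (List (String × String)) :=
  let results : List (List (String × String)) :=
    match PySem.Dict.get? (PySem.Dict.mk data) "result" with
    | some v => if v.isEmpty then [] else v
    | none => []
  match results with
  | [] => none
  | h :: t =>
      -- max(results, key=score): first element attaining the maximal score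
      some (t.foldl (fun best r => if pvScore preferred_variant preferred_language r > pvScore preferred_variant preferred_language best then r else best) h)

-- ===== PRECONDITION & SPEC =====
def Spec_select_api_result_py (data : List (String × List (List (String × String)))) (preferred_variant : Option String) (preferred_language : Option String) (out : Option (List (String × String))) : Prop := out = select_api_result_py_alt data preferred_variant preferred_language
instance (data : List (String × List (List (String × String)))) (preferred_variant : Option String) (preferred_language : Option String) (out : Option (List (String × String))) : Decidable (Spec_select_api_result_py data preferred_variant preferred_language out) := by unfold Spec_select_api_result_py; infer_instance

-- ===== CLAIM (what is proved, stated in full; the proofs are below) =====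
def Claim_equal_select_api_result_py : Prop := ∀ (data : List (String × List (List (String × String)))) (preferred_variant : Option String) (preferred_language : Option String), Dom_select_api_result_py data preferred_variant preferred_language → Spec_select_api_result_py data preferred_variant preferred_language (select_api_result_py data preferred_variant preferred_language)

-- ===== LEMMAS AND PROOFS =====

-- the common selection value: first with both matches, else first with language match,
-- else first with variant match, else the head
def pvPick {α : Type} (P V : α → Bool) (h : α) (t : List α) : α :=
  match (h :: t).find? (fun r => P r && V r) with
  | some r => r
  | none =>
      match (h :: t).find? P with
      | some r => r
      | none =>
          match (h :: t).find? V with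
          | some r => r
          | none => h

def pvScoreOf {α : Type} (P V : α → Bool) (r : α) : Nat :=
  (if P r then 2 else 0) + (if V r then 1 else 0)

theorem pvPick_cons {α : Type} (P V : α → Bool) (h x : α) (t : List α) :
    pvPick P V h (x :: t) = pvPick P V (if pvScoreOf P V x > pvScoreOf P V h then x else h) t := by
  cases hP : P h <;> cases hV : V h <;> cases hPx : P x <;> cases hVx : V x <;>
    simp [pvPick, pvScoreOf, List.find?, hP, hV, hPx, hVx]

theorem pvFold_eq_pick {α : Type} (P V : α → Bool) (t : List α) (h : α) :
    t.foldl (fun best r => if pvScoreOf P V r > pvScoreOf P V best then r else best) h = pvPick P V h t := by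
  induction t generalizing h with
  | nil => cases hP : P h <;> cases hV : V h <;> simp [pvPick, List.find?, hP, hV]
  | cons x t ih => rw [List.foldl_cons, ih, ← pvPick_cons]

theorem pvHead?_filter {α : Type} (p : α → Bool) (l : List α) : (l.filter p).head? = l.find? p := by
  induction l with
  | nil => rfl
  | cons x t ih => by_cases hx : p x <;> simp [List.filter_cons, List.find?_cons, hx, ih]

-- A's language stage equals the uniform "filter, keep if nonempty" form over pvLangMatch
theorem pvStage_lang (pl : Option String) (l : List (List (String × String))) :
    (match pl with
     | some s =>
         if s ≠ "" then
           let lang_matches := l.filter (fun r => PySem.Dict.get? (PySem.Dict.mk r) "language" == some s)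
           if ¬ lang_matches.isEmpty then lang_matches else l
         else l
     | none => l) =
    (if (l.filter (pvLangMatch pl)).isEmpty then l else l.filter (pvLangMatch pl)) := by
  cases pl with
  | none => simp [pvLangMatch]
  | some s =>
      by_cases hs : s = ""
      · simp [hs, pvLangMatch, List.filter_eq_nil_iff]
      · have hf : List.filter (pvLangMatch (some s)) l = List.filter (fun r => PySem.Dict.get? (PySem.Dict.mk r) "language" == some s) l :=
          List.filter_congr (fun x _ => by simp [pvLangMatch, hs])
        rw [hf]
        cases he : (List.filter (fun r => PySem.Dict.get? (PySem.Dict.mk r) "language" == some s) l).isEmpty <;>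
          simp [hs, he]

theorem pvStage_var (pv : Option String) (l : List (List (String × String))) :
    (match pv with
     | some s =>
         if s ≠ "" then
           let variant_matches := l.filter (fun r => PySem.Dict.get? (PySem.Dict.mk r) "variant" == some s)
           if ¬ variant_matches.isEmpty then variant_matches else l
         else l
     | none => l) =
    (if (l.filter (pvVarMatch pv)).isEmpty then l else l.filter (pvVarMatch pv)) := by
  cases pv with
  | none => simp [pvVarMatch]
  | some s =>
      by_cases hs : s = ""
      · simp [hs, pvVarMatch, List.filter_eq_nil_iff]
      · have hf : List.filter (pvVarMatch (some s)) l = List.filter (fun r => PySem.Dict.get? (PySem.Dict.mk r) "variant" == some s) l :=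
          List.filter_congr (fun x _ => by simp [pvVarMatch, hs])
        rw [hf]
        cases he : (List.filter (fun r => PySem.Dict.get? (PySem.Dict.mk r) "variant" == some s) l).isEmpty <;>
          simp [hs, he]

-- the two-stage filtering on a nonempty list picks pvPick
theorem pvTwoStage_eq_pick (P V : List (String × String) → Bool) (h : List (String × String)) (t : List (List (String × String))) :
    (let l := h :: t
     let f1 := if (l.filter P).isEmpty then l else l.filter P
     let f2 := if (f1.filter V).isEmpty then f1 else f1.filter V
     f2.head?) = some (pvPick P V h t) := by
  simp only []
  set l := h :: t with hl
  by_cases h1 : (l.filter P).isEmpty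
  · have hPnil : l.filter P = [] := List.isEmpty_iff.mp h1
    have hfP : l.find? P = none := by rw [← pvHead?_filter, hPnil]; rfl
    have hfPV : l.find? (fun r => P r && V r) = none := by
      rw [List.find?_eq_none] at hfP ⊢; intro x hx; simp [hfP x hx]
    by_cases h2 : (l.filter V).isEmpty
    · have hVnil : l.filter V = [] := List.isEmpty_iff.mp h2
      have hfV : l.find? V = none := by rw [← pvHead?_filter, hVnil]; rfl
      rw [if_pos h1, if_pos h2]
      simp only [pvPick, ← hl, hfPV, hfP, hfV]
      rfl
    · rw [if_pos h1, if_neg h2, pvHead?_filter]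
      simp only [pvPick, ← hl, hfPV, hfP]
      cases hv : l.find? V with
      | none =>
          rw [← pvHead?_filter] at hv
          exact absurd (List.isEmpty_iff.mpr (List.head?_eq_none_iff.mp hv)) h2
      | some r => rfl
  · have hff : (l.filter P).filter V = l.filter (fun r => P r && V r) := by
      rw [List.filter_filter]; exact List.filter_congr (fun x _ => Bool.and_comm _ _)
    rw [if_neg h1]
    by_cases h2 : ((l.filter P).filter V).isEmpty
    · have hnil : l.filter (fun r => P r && V r) = [] := by rw [← hff]; exact List.isEmpty_iff.mp h2
      have hfPV : l.find? (fun r => P r && V r) = none := by rw [← pvHead?_filter, hnil]; rfl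
      rw [if_pos h2, pvHead?_filter]
      simp only [pvPick, ← hl, hfPV]
      cases hv : l.find? P with
      | none =>
          rw [← pvHead?_filter] at hv
          exact absurd (List.isEmpty_iff.mpr (List.head?_eq_none_iff.mp hv)) h1
      | some r => rfl
    · rw [if_neg h2, hff, pvHead?_filter]
      simp only [pvPick, ← hl]
      cases hv : l.find? (fun r => P r && V r) with
      | none =>
          rw [← pvHead?_filter] at hv
          exact absurd (List.isEmpty_iff.mpr (hff ▸ List.head?_eq_none_iff.mp hv)) h2
      | some r => rfl

theorem pvFoldB (preferred_variant preferred_language : Option String) (t : List (List (String × String))) (h : List (String × String)) :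
    t.foldl (fun best r => if pvScore preferred_variant preferred_language r > pvScore preferred_variant preferred_language best then r else best) h
      = pvPick (pvLangMatch preferred_language) (pvVarMatch preferred_variant) h t :=
  pvFold_eq_pick (pvLangMatch preferred_language) (pvVarMatch preferred_variant) t h

-- ===== VERDICT (by name: the statement is the Claim_ definition above) =====
theorem select_api_result_py_spec : Claim_equal_select_api_result_py := by
  intro data pv pl _
  unfold Spec_select_api_result_py select_api_result_py select_api_result_py_alt
  simp only []
  cases (match PySem.Dict.get? (PySem.Dict.mk data) "result" with
         | some v => if v.isEmpty then [] else v
         | none => ([] : List (List (String × String)))) with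
  | nil => simp
  | cons h t =>
      simp only [List.isEmpty_cons, Bool.false_eq_true, if_false]
      rw [pvFoldB pv pl t h]
      rw [pvStage_lang pl (h :: t), pvStage_var pv]
      rw [show ∀ (l : List (List (String × String))), (match l with | [] => (none : Option (List (String × String))) | r :: _ => some r) = l.head? from fun l => by cases l <;> rfl]
      have H := pvTwoStage_eq_pick (pvLangMatch pl) (pvVarMatch pv) h t
      simp only [] at H
      exact H
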